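-- pv_equiv track=rewrite | github.com/abyt2002-alt/Marketing-Budget-Allocation | marketing-budget-allocation-backend/app/services/intent_debug.py | _infer_exclusions_from_prompt
-- ===== SOURCE A (Python) =====
-- from typing import Any, Literal
--
-- def _infer_exclusions_from_prompt(prompt: str, available_markets: list[str]) -> list[dict[str, Any]]:
--     prompt_lower = prompt.lower()
--     exclusion_signals = ("don't include", "dont include", "do not include", "exclude", "without", "remove")
--     if not any(signal in prompt_lower for signal in exclusion_signals):
--         return []
--     exclusions: list[dict[str, Any]] = []
--     for market in available_markets:
--         market_lower = market.lower()
--         if market_lower in prompt_lower: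
--             prefix = prompt_lower.split(market_lower, 1)[0]
--             if any(signal in prefix for signal in exclusion_signals):
--                 exclusions.append({"market": market, "source_text": prompt})
--     return exclusions
-- ===== SOURCE B (Python) =====
-- def _infer_exclusions_from_prompt(prompt, available_markets):
--     prompt_lower = prompt.lower()
--     exclusion_signals = ("don't include", "dont include", "do not include", "exclude", "without", "remove")
--     # end position (index just past the last char) of the first occurrence of each signal present
--     ends = [prompt_lower.find(s) + len(s) for s in exclusion_signals if s in prompt_lower]
--     if not ends:
--         return []
--     min_end = min(ends)
--     exclusions = []
--     for market in available_markets: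
--         idx = prompt_lower.find(market.lower())
--         if idx != -1 and min_end <= idx:
--             exclusions.append({"market": market, "source_text": prompt})
--     return exclusions
-- ===== Notes on version B (the rewrite author's own statement) =====
-- stated objective: alternative
-- what changed: Instead of re-splitting the prompt at each market and re-scanning the prefix for every signal, B precomputes once the minimal end position of any exclusion signal present and then decides each market with a single find plus one numeric comparison.
import Mathlib
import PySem

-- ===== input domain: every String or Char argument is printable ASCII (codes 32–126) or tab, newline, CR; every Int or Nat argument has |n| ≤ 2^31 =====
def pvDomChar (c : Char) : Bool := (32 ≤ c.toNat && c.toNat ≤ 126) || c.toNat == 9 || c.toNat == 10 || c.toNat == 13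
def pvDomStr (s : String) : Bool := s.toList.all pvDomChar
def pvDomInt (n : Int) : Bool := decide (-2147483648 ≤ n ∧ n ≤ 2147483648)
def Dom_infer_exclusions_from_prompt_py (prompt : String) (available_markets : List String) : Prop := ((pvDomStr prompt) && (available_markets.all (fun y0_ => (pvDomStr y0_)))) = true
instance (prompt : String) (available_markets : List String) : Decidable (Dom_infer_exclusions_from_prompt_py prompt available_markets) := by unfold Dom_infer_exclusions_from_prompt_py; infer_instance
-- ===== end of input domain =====

-- B replaces A's per-market prompt split + prefix re-scan by one precomputed minimal
-- signal end position and a single find-and-compare per market (alternative decomposition).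


-- ===== PORT A =====
def pvSignals : List String :=
  ["don't include", "dont include", "do not include", "exclude", "without", "remove"]

def infer_exclusions_from_prompt_py (prompt : String) (available_markets : List String) : List (List (String × String)) :=
  let prompt_lower := PySem.Str.lower prompt
  if !(pvSignals.any (fun signal => PySem.Str.isIn signal prompt_lower)) then []
  else
    available_markets.foldl (fun exclusions market =>
      let market_lower := PySem.Str.lower market
      if PySem.Str.isIn market_lower prompt_lower then
        -- prompt_lower.split(market_lower, 1)[0]; splitMax? is none exactly where Python's
        -- split raises ValueError (empty separator) — those inputs are excluded by Pre_
        let pre := ((PySem.Str.splitMax? prompt_lower market_lower 1).getD []).headD ""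
        if pvSignals.any (fun signal => PySem.Str.isIn signal pre) then
          exclusions ++ [[("market", market), ("source_text", prompt)]]
        else exclusions
      else exclusions) []

-- ===== PORT B =====
def infer_exclusions_from_prompt_py_alt (prompt : String) (available_markets : List String) : List (List (String × String)) :=
  let prompt_lower := PySem.Str.lower prompt
  let ends := (pvSignals.filter (fun s => PySem.Str.isIn s prompt_lower)).map
      (fun s => PySem.Str.find prompt_lower s + PySem.Str.len s)
  match PySem.List.min? ends id with
  | none => []   -- "if not ends: return []"
  | some min_end =>
    available_markets.foldl (fun exclusions market =>
      let idx := PySem.Str.find prompt_lower (PySem.Str.lower market)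
      if idx ≠ -1 ∧ min_end ≤ idx then
        exclusions ++ [[("market", market), ("source_text", prompt)]]
      else exclusions) []

-- ===== PRECONDITION & SPEC =====
-- Pre_ excludes exactly the inputs where A raises ValueError: an empty string among
-- available_markets while the prompt contains an exclusion signal (empty split separator).
def Pre_infer_exclusions_from_prompt_py (prompt : String) (available_markets : List String) : Prop :=
  ¬ (pvSignals.any (fun signal => PySem.Str.isIn signal (PySem.Str.lower prompt)) = true ∧ "" ∈ available_markets)
instance (prompt : String) (available_markets : List String) : Decidable (Pre_infer_exclusions_from_prompt_py prompt available_markets) := by unfold Pre_infer_exclusions_from_prompt_py; infer_instance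

def pvWitness_infer_exclusions_from_prompt_py : String × List String := ("exclude France please", ["France", "Spain"])

def Spec_infer_exclusions_from_prompt_py (prompt : String) (available_markets : List String) (out : List (List (String × String))) : Prop := out = infer_exclusions_from_prompt_py_alt prompt available_markets
instance (prompt : String) (available_markets : List String) (out : List (List (String × String))) : Decidable (Spec_infer_exclusions_from_prompt_py prompt available_markets out) := by unfold Spec_infer_exclusions_from_prompt_py; infer_instance

-- ===== CLAIM (what is proved, stated in full; the proofs are below) =====
def Claim_equal_infer_exclusions_from_prompt_py : Prop := ∀ (prompt : String) (available_markets : List String), Dom_infer_exclusions_from_prompt_py prompt available_markets → Pre_infer_exclusions_from_prompt_py prompt available_markets → Spec_infer_exclusions_from_prompt_py prompt available_markets (infer_exclusions_from_prompt_py prompt available_markets)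

-- ===== LEMMAS AND PROOFS =====
theorem pv_find_go_eq (sub : List Char) : ∀ (l : List Char) (k : Nat),
    PySem.Chars.find.go sub l k =
      if PySem.Chars.find l sub = -1 then -1 else (k : Int) + PySem.Chars.find l sub := by
  intro l
  induction l with
  | nil =>
    intro k
    simp [PySem.Chars.find, PySem.Chars.find.go]
    split <;> simp
  | cons c t ih =>
    intro k
    rw [PySem.Chars.find.go]
    by_cases hp : sub.isPrefixOf (c :: t) = true
    · simp [hp, PySem.Chars.find, PySem.Chars.find.go]
    · rw [if_neg hp, ih (k+1)]
      conv_rhs => rw [PySem.Chars.find, PySem.Chars.find.go]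
      rw [if_neg hp, ih 1]
      have h1 := PySem.Chars.neg_one_le_find t sub
      by_cases h0 : PySem.Chars.find t sub = -1 <;> simp [h0]
      rw [if_neg (by omega)]
      ring

theorem pv_find_of_prefix {sub l : List Char} (h : sub.isPrefixOf l = true) :
    PySem.Chars.find l sub = 0 := by
  cases l with
  | nil =>
    have : sub = [] := by exact List.prefix_nil.mp (List.isPrefixOf_iff_prefix.mp h)
    simp [this, PySem.Chars.find, PySem.Chars.find.go]
  | cons c t =>
    rw [PySem.Chars.find, PySem.Chars.find.go, if_pos h]; norm_num

theorem pv_find_cons {sub : List Char} {c : Char} {t : List Char}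
    (h : ¬ sub.isPrefixOf (c :: t) = true) :
    PySem.Chars.find (c :: t) sub =
      if PySem.Chars.find t sub = -1 then -1 else 1 + PySem.Chars.find t sub := by
  rw [PySem.Chars.find, PySem.Chars.find.go, if_neg h, pv_find_go_eq]
  norm_num


theorem pv_go_zero (sep : List Char) : ∀ (fuel : Nat) (l cur : List Char) (acc : List (List Char)),
    PySem.Chars.splitOnMax.go sep fuel 0 l cur acc = ((cur.reverse ++ l) :: acc).reverse := by
  intro fuel l cur acc
  cases fuel with
  | zero => rw [PySem.Chars.splitOnMax.go]
  | succ f =>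
    cases l with
    | nil =>
      rw [PySem.Chars.splitOnMax.go]
      · simp
      · omega
    | cons c t =>
      rw [PySem.Chars.splitOnMax.go]
      simp

theorem pv_go_one (sep : List Char) (hsep : sep ≠ []) :
    ∀ (fuel : Nat) (l cur : List Char) (acc : List (List Char)), l.length < fuel →
    PySem.Chars.splitOnMax.go sep fuel 1 l cur acc =
      if PySem.Chars.isIn sep l = true then
        acc.reverse ++ [cur.reverse ++ l.take (PySem.Chars.find l sep).toNat,
                        l.drop ((PySem.Chars.find l sep).toNat + sep.length)]
      else acc.reverse ++ [cur.reverse ++ l] := by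
  intro fuel
  induction fuel with
  | zero => intro l cur acc h; omega
  | succ f ih =>
    intro l cur acc h
    cases l with
    | nil =>
      have h0 : PySem.Chars.isIn sep [] = false := by
        rw [PySem.Chars.isIn_eq_false_iff]
        intro hinf
        exact hsep (List.infix_nil.mp hinf)
      rw [PySem.Chars.splitOnMax.go]
      · simp [h0]
      · omega
    | cons c t =>
      rw [PySem.Chars.splitOnMax.go]
      simp only [if_neg (by norm_num : ¬ (1:Nat) = 0)]
      by_cases hp : sep.isPrefixOf (c :: t) = true
      · rw [if_pos hp, pv_go_zero]
        have hin : PySem.Chars.isIn sep (c :: t) = true := by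
          rw [PySem.Chars.isIn_iff_infix]
          exact (List.isPrefixOf_iff_prefix.mp hp).isInfix
        have hf : PySem.Chars.find (c :: t) sep = 0 := pv_find_of_prefix hp
        simp [hin, hf]
      · rw [if_neg hp, ih t (c :: cur) acc (by simpa using Nat.lt_of_succ_lt_succ h)]
        by_cases ht : PySem.Chars.isIn sep t = true
        · have hft : PySem.Chars.find t sep ≠ -1 := by
            rw [PySem.Chars.find_ne_neg_one_iff]; exact (PySem.Chars.isIn_iff_infix sep t).mp ht
          have hft0 : 0 ≤ PySem.Chars.find t sep := by
            have := PySem.Chars.neg_one_le_find t sep; omega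
          have hin : PySem.Chars.isIn sep (c :: t) = true := by
            rw [PySem.Chars.isIn_iff_infix]
            exact List.infix_cons ((PySem.Chars.isIn_iff_infix sep t).mp ht)
          have hfc : PySem.Chars.find (c :: t) sep = 1 + PySem.Chars.find t sep := by
            rw [pv_find_cons hp, if_neg hft]
          have htn : (PySem.Chars.find (c :: t) sep).toNat = (PySem.Chars.find t sep).toNat + 1 := by
            rw [hfc]; omega
          simp only [ht, hin, if_pos, htn, List.take_succ_cons]
          rw [show (PySem.Chars.find t sep).toNat + 1 + sep.length = ((PySem.Chars.find t sep).toNat + sep.length) + 1 by omega, List.drop_succ_cons]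
          simp
        · have ht' : PySem.Chars.isIn sep t = false := by simpa using ht
          have hft : PySem.Chars.find t sep = -1 := by
            rw [PySem.Chars.find_eq_neg_one_iff]
            exact (PySem.Chars.isIn_eq_false_iff sep t).mp ht'
          have hin : PySem.Chars.isIn sep (c :: t) = false := by
            rw [PySem.Chars.isIn_eq_false_iff]
            intro hinf
            rcases List.infix_cons_iff.mp hinf with hpre | hinf2
            · exact hp (List.isPrefixOf_iff_prefix.mpr hpre)
            · exact (PySem.Chars.isIn_eq_false_iff sep t).mp ht' hinf2
          simp [ht', hin]

theorem pv_split_head {s sep : List Char} (hsep : sep ≠ []) (h : PySem.Chars.isIn sep s = true) :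
    PySem.Chars.splitOnMax s sep 1 =
      [s.take (PySem.Chars.find s sep).toNat,
       s.drop ((PySem.Chars.find s sep).toNat + sep.length)] := by
  rw [PySem.Chars.splitOnMax, if_neg (by norm_num), show Int.toNat 1 = 1 from rfl,
    pv_go_one sep hsep (s.length + 1) s [] [] (by omega)]
  simp [h]

theorem pv_isIn_take_iff (sub s : List Char) (n : Nat) (hsub : sub ≠ []) :
    PySem.Chars.isIn sub (s.take n) = true ↔
      (0 ≤ PySem.Chars.find s sub ∧ (PySem.Chars.find s sub).toNat + sub.length ≤ n) := by
  constructor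
  · intro h
    obtain ⟨j, hj⟩ := (PySem.Chars.exists_prefix_drop_iff_isIn sub (s.take n)).mpr h
    rw [List.drop_take] at hj
    have hpre : sub <+: s.drop j := hj.trans (List.take_prefix _ _)
    have hlen : sub.length ≤ n - j := by
      have := hj.length_le
      simp at this
      omega
    have hjn : j < n := by
      rcases Nat.lt_or_ge j n with h1 | h1
      · exact h1
      · exfalso
        have : n - j = 0 := by omega
        rw [this, List.take_zero] at hj
        exact hsub (List.prefix_nil.mp hj)
    have hnonneg : 0 ≤ PySem.Chars.find s sub := by
      rw [PySem.Chars.find_nonneg_iff]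
      exact (PySem.Chars.isIn_iff_infix sub s).mp ((PySem.Chars.exists_prefix_drop_iff_isIn sub s).mp ⟨j, hpre⟩)
    refine ⟨hnonneg, ?_⟩
    obtain ⟨hfpre, hmin⟩ := PySem.Chars.find_spec hnonneg
    have hle : (PySem.Chars.find s sub).toNat ≤ j := by
      by_contra hgt
      exact hmin j (by omega) hpre
    omega
  · rintro ⟨hnonneg, hle⟩
    obtain ⟨hfpre, -⟩ := PySem.Chars.find_spec hnonneg
    rw [← PySem.Chars.exists_prefix_drop_iff_isIn]
    refine ⟨(PySem.Chars.find s sub).toNat, ?_⟩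
    rw [List.drop_take]
    rw [List.prefix_take_iff]
    exact ⟨hfpre, by omega⟩

theorem pv_min?_some {xs : List Int} (h : xs ≠ []) : ∃ m, PySem.List.min? xs id = some m := by
  cases h' : PySem.List.min? xs id with
  | none => exact absurd ((PySem.List.min?_eq_none_iff xs id).mp h') h
  | some m => exact ⟨m, rfl⟩

theorem pv_signals_ne : ∀ sig ∈ pvSignals, sig.toList ≠ [] := by decide

-- any signal occurs in the first n chars of P  ↔  the minimal signal end position is ≤ n
theorem pv_any_prefix_iff (P : List Char) (m : Int) (n : Nat)
    (hm : PySem.List.min? ((pvSignals.filter (fun s => PySem.Chars.isIn s.toList P)).map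
        (fun s => PySem.Chars.find P s.toList + (s.toList.length : Int))) id = some m) :
    ((pvSignals.any fun sig => PySem.Chars.isIn sig.toList (P.take n)) = true) ↔ m ≤ (n : Int) := by
  constructor
  · intro h
    obtain ⟨sig, hsig, hIn⟩ := List.any_eq_true.mp h
    have hne := pv_signals_ne sig hsig
    rw [pv_isIn_take_iff _ _ _ hne] at hIn
    obtain ⟨h0, hle⟩ := hIn
    have hfne : PySem.Chars.find P sig.toList ≠ -1 := by omega
    have hsigin : PySem.Chars.isIn sig.toList P = true := by
      simp [PySem.Chars.isIn, hfne]
    have hmem : (PySem.Chars.find P sig.toList + (sig.toList.length : Int)) ∈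
        (pvSignals.filter (fun s => PySem.Chars.isIn s.toList P)).map
          (fun s => PySem.Chars.find P s.toList + (s.toList.length : Int)) :=
      List.mem_map.mpr ⟨sig, List.mem_filter.mpr ⟨hsig, hsigin⟩, rfl⟩
    have hmin := PySem.List.min?_isMin hm _ hmem
    simp only [id] at hmin
    omega
  · intro h
    have hmem := PySem.List.min?_mem hm
    obtain ⟨sig, hfil, hval⟩ := List.mem_map.mp hmem
    obtain ⟨hsig, hsigin⟩ := List.mem_filter.mp hfil
    rw [List.any_eq_true]
    refine ⟨sig, hsig, ?_⟩
    have hne := pv_signals_ne sig hsig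
    rw [pv_isIn_take_iff _ _ _ hne]
    have hfne : PySem.Chars.find P sig.toList ≠ -1 := by
      simp [PySem.Chars.isIn] at hsigin
      exact hsigin
    have h1 := PySem.Chars.neg_one_le_find P sig.toList
    omega

-- ===== VERDICT =====
theorem infer_exclusions_from_prompt_py_spec : Claim_equal_infer_exclusions_from_prompt_py := by
  intro prompt available_markets _ hpre
  unfold Spec_infer_exclusions_from_prompt_py
  unfold infer_exclusions_from_prompt_py infer_exclusions_from_prompt_py_alt
  simp only [PySem.Str.isIn_eq, PySem.Str.find_eq, PySem.Str.len_eq, PySem.Str.toList_lower]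
  by_cases hany : (pvSignals.any fun signal => PySem.Chars.isIn signal.toList (PySem.Chars.lower prompt.toList)) = true
  case neg =>
    rw [Bool.not_eq_true] at hany
    have hfil : pvSignals.filter (fun s => PySem.Chars.isIn s.toList (PySem.Chars.lower prompt.toList)) = [] :=
      List.filter_eq_nil_iff.mpr (fun s hs => by rw [List.any_eq_false] at hany; simp [hany s hs])
    rw [hany, hfil]
    simp only [List.map_nil, Bool.not_false, if_true]
    rfl
  case pos =>
    have hanyS : (pvSignals.any fun signal => PySem.Str.isIn signal (PySem.Str.lower prompt)) = true := by
      simpa using hany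
    have hnem : "" ∉ available_markets := fun hmm => hpre ⟨hanyS, hmm⟩
    obtain ⟨m, hm⟩ : ∃ m, PySem.List.min? ((pvSignals.filter
        (fun s => PySem.Chars.isIn s.toList (PySem.Chars.lower prompt.toList))).map
        (fun s => PySem.Chars.find (PySem.Chars.lower prompt.toList) s.toList + (s.toList.length : Int))) id = some m := by
      apply pv_min?_some
      obtain ⟨sig, hsig, hIn⟩ := List.any_eq_true.mp hany
      simp only [ne_eq, List.map_eq_nil_iff, List.filter_eq_nil_iff]
      intro hall
      exact absurd hIn (by simpa using hall sig hsig)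
    rw [hany, hm]
    simp only [Bool.not_true, Bool.false_eq_true, if_false]
    apply PySem.List.foldl_congr_mem
    intro acc market hmem
    have hm0 : market ≠ "" := fun e => hnem (e ▸ hmem)
    have hmlt : market.toList ≠ [] := fun hl => hm0 (String.toList_inj.mp (by rw [hl]; rfl))
    have hmlne : PySem.Chars.lower market.toList ≠ [] := by
      rw [PySem.Chars.lower]; simpa using hmlt
    by_cases hin : PySem.Chars.isIn (PySem.Chars.lower market.toList) (PySem.Chars.lower prompt.toList) = true
    · have hfne : PySem.Chars.find (PySem.Chars.lower prompt.toList) (PySem.Chars.lower market.toList) ≠ -1 := by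
        simp [PySem.Chars.isIn] at hin
        exact hin
      have h1 := PySem.Chars.neg_one_le_find (PySem.Chars.lower prompt.toList) (PySem.Chars.lower market.toList)
      have hsplit : PySem.Str.splitMax? (PySem.Str.lower prompt) (PySem.Str.lower market) 1 =
          some [String.ofList ((PySem.Chars.lower prompt.toList).take
                  (PySem.Chars.find (PySem.Chars.lower prompt.toList) (PySem.Chars.lower market.toList)).toNat),
                String.ofList ((PySem.Chars.lower prompt.toList).drop
                  ((PySem.Chars.find (PySem.Chars.lower prompt.toList) (PySem.Chars.lower market.toList)).toNat
                    + (PySem.Chars.lower market.toList).length))] := by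
        rw [PySem.Str.splitMax?]
        simp only [PySem.Str.toList_lower]
        rw [PySem.Chars.splitMax?, if_neg (by simpa using hmlne)]
        rw [pv_split_head hmlne hin]
        rfl
      rw [hin, if_pos rfl, hsplit]
      simp only [Option.getD_some, List.headD_cons, String.toList_ofList]
      have hiff := pv_any_prefix_iff (PySem.Chars.lower prompt.toList) m
        (PySem.Chars.find (PySem.Chars.lower prompt.toList) (PySem.Chars.lower market.toList)).toNat hm
      by_cases hc : m ≤ PySem.Chars.find (PySem.Chars.lower prompt.toList) (PySem.Chars.lower market.toList)
      · rw [hiff.mpr (by omega), if_pos rfl, if_pos ⟨hfne, hc⟩]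
      · have hfalse : (pvSignals.any fun sig => PySem.Chars.isIn sig.toList
            ((PySem.Chars.lower prompt.toList).take
              (PySem.Chars.find (PySem.Chars.lower prompt.toList) (PySem.Chars.lower market.toList)).toNat)) = false :=
          Bool.eq_false_iff.mpr (fun habs => hc (by have := hiff.mp habs; omega))
        rw [hfalse, if_neg (by simp), if_neg (fun h => hc h.2)]
    · have hin' : PySem.Chars.isIn (PySem.Chars.lower market.toList) (PySem.Chars.lower prompt.toList) = false := by
        simpa using hin
      have hfeq : PySem.Chars.find (PySem.Chars.lower prompt.toList) (PySem.Chars.lower market.toList) = -1 := by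
        simp [PySem.Chars.isIn] at hin'
        exact hin'
      rw [hin', if_neg (by simp), if_neg (fun h => h.1 hfeq)]
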